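-- pv_equiv track=rewrite | github.com/Vinhcognito/myAoc | 2023/Current/day13.py | check_mirror
-- ===== SOURCE A (Python) =====
-- def check_mirror(li: list[str], idx: int) -> bool:
--     for i in range(min([idx + 1, len(li) - (idx + 1)])):
--         str1 = li[idx - i]
--         str2 = li[idx + 1 + i]
--         if str1 == str2:
--             continue
--         else:
--             return False
--     return True
-- ===== SOURCE B (Python) =====
-- def check_mirror(li: list[str], idx: int) -> bool:
--     n = min(idx + 1, len(li) - (idx + 1))
--     if n <= 0:
--         return True
--     left = li[idx + 1 - n:idx + 1]
--     right = li[idx + 1:idx + 1 + n]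
--     return left[::-1] == right
-- ===== Notes on version B (the rewrite author's own statement) =====
-- stated objective: simpler
-- what changed: Replaces the element-by-element outward-scanning loop with early exit by extracting the two mirror slices once and comparing the reversed left slice with the right slice in a single whole-list equality.
import Mathlib
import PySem

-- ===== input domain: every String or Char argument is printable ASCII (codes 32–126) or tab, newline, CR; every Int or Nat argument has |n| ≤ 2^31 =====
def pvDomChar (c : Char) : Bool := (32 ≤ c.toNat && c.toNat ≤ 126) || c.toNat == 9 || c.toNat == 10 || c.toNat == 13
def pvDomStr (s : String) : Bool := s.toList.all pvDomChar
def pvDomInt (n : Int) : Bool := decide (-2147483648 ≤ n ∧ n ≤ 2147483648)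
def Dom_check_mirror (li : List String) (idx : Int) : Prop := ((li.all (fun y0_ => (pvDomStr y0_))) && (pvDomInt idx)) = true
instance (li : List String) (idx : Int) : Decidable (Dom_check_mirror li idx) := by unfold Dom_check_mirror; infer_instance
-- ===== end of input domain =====

-- B replaces A's outward-scanning comparison loop by extracting the two mirror slices
-- and comparing the reversed left slice with the right slice (objective: simpler).


-- ===== PORT A =====
-- the for-loop with its early 'return False'; the index accesses never go out of
-- range (the loop bound guarantees it), the none branch is unreachable
def checkLoopA (li : List String) (idx : Int) : List Int → Bool
  | [] => true
  | i :: rest =>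
    match PySem.List.pyGet? li (idx - i), PySem.List.pyGet? li (idx + 1 + i) with
    | some str1, some str2 => if str1 == str2 then checkLoopA li idx rest else false
    | _, _ => false

def check_mirror (li : List String) (idx : Int) : Bool :=
  checkLoopA li idx (PySem.List.pyRange 0 (min (idx + 1) ((li.length : Int) - (idx + 1))) 1)

-- ===== PORT B =====
-- left[::-1] is ported as List.reverse (PySem.List.slice?_none_none_neg_one)
def check_mirror_alt (li : List String) (idx : Int) : Bool :=
  let n := min (idx + 1) ((li.length : Int) - (idx + 1))
  if n ≤ 0 then true
  else
    let left := PySem.List.slice li (some (idx + 1 - n)) (some (idx + 1))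
    let right := PySem.List.slice li (some (idx + 1)) (some (idx + 1 + n))
    left.reverse == right

-- ===== PRECONDITION & SPEC =====
def Spec_check_mirror (li : List String) (idx : Int) (out : Bool) : Prop := out = check_mirror_alt li idx
instance (li : List String) (idx : Int) (out : Bool) : Decidable (Spec_check_mirror li idx out) := by unfold Spec_check_mirror; infer_instance

-- ===== CLAIM (what is proved, stated in full; the proofs are below) =====
def Claim_equal_check_mirror : Prop := ∀ (li : List String) (idx : Int), Dom_check_mirror li idx → Spec_check_mirror li idx (check_mirror li idx)

-- ===== LEMMAS AND PROOFS =====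

-- A's early-exit loop equals an 'all' over the same index list
lemma checkLoopA_eq_all (li : List String) (idx : Int) (r : List Int) :
    checkLoopA li idx r = r.all (fun i =>
      match PySem.List.pyGet? li (idx - i), PySem.List.pyGet? li (idx + 1 + i) with
      | some str1, some str2 => str1 == str2
      | _, _ => false) := by
  induction r with
  | nil => rfl
  | cons i rest ih =>
    simp only [checkLoopA, List.all_cons]
    cases h1 : PySem.List.pyGet? li (idx - i) <;> cases h2 : PySem.List.pyGet? li (idx + 1 + i) <;>
      simp [ih, beq_eq_decide]

-- core: the pointwise mirror condition equals the slice-reversal equality (Nat form)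
lemma rev_take_drop_iff (li : List String) (j N : ℕ) (hN : N ≤ j + 1)
    (hL : j + 1 + N ≤ li.length) :
    (((li.drop (j + 1 - N)).take N).reverse = (li.drop (j + 1)).take N) ↔
    (∀ k, k < N → li[j - k]? = li[j + 1 + k]?) := by
  have hlenL : ((li.drop (j + 1 - N)).take N).length = N := by
    simp [List.length_take, List.length_drop]; omega
  have hlenR : ((li.drop (j + 1)).take N).length = N := by
    simp [List.length_take, List.length_drop]; omega
  have hget : ∀ k, k < N →
      (((li.drop (j + 1 - N)).take N).reverse)[k]? = li[j - k]? ∧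
      ((li.drop (j + 1)).take N)[k]? = li[j + 1 + k]? := by
    intro k hk
    constructor
    · rw [List.getElem?_reverse (by omega)]
      rw [hlenL]
      rw [List.getElem?_take_of_lt (by omega), List.getElem?_drop]
      congr 1; omega
    · rw [List.getElem?_take_of_lt hk, List.getElem?_drop]
  constructor
  · intro h k hk
    have := congrArg (fun l => l[k]?) h
    simp only at this
    rw [(hget k hk).1, (hget k hk).2] at this
    exact this
  · intro h
    apply List.ext_getElem?
    intro k
    by_cases hk : k < N
    · rw [(hget k hk).1, (hget k hk).2]; exact h k hk
    · rw [List.getElem?_eq_none (by simp [hlenL]; omega),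
        List.getElem?_eq_none (by rw [hlenR]; omega)]

-- ===== VERDICT (by name: the statement is the Claim_ definition above) =====
theorem check_mirror_spec : Claim_equal_check_mirror := by
  intro li idx _
  show check_mirror li idx = check_mirror_alt li idx
  unfold check_mirror check_mirror_alt
  set n := min (idx + 1) ((li.length : Int) - (idx + 1)) with hn
  by_cases hpos : n ≤ 0
  · -- empty loop range on both sides
    have : PySem.List.pyRange 0 n 1 = [] := by
      rw [PySem.List.pyRange_one]
      simp
      omega
    rw [this]
    simp only [checkLoopA]
    rw [if_pos hpos]
  · rw [not_le] at hpos
    simp only [if_neg (by omega : ¬ n ≤ 0)]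
    -- everything is nonnegative: move to ℕ
    obtain ⟨j, hj⟩ : ∃ j : ℕ, idx = (j : ℤ) :=
      ⟨idx.toNat, (Int.toNat_of_nonneg (by omega)).symm⟩
    obtain ⟨N, hNn⟩ : ∃ N : ℕ, n = (N : ℤ) :=
      ⟨n.toNat, (Int.toNat_of_nonneg (by omega)).symm⟩
    have hN1 : N ≤ j + 1 := by omega
    have hNL : j + 1 + N ≤ li.length := by omega
    -- slices in drop/take form
    have hleft : PySem.List.slice li (some (idx + 1 - n)) (some (idx + 1)) =
        (li.drop (j + 1 - N)).take N := by
      have e1 : idx + 1 - n = ((j + 1 - N : ℕ) : ℤ) := by omega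
      have e2 : idx + 1 = ((j + 1 : ℕ) : ℤ) := by omega
      rw [e1, e2, PySem.List.slice_natCast]
      congr 1; omega
    have hright : PySem.List.slice li (some (idx + 1)) (some (idx + 1 + n)) =
        (li.drop (j + 1)).take N := by
      have e1 : idx + 1 = ((j + 1 : ℕ) : ℤ) := by omega
      have e2 : idx + 1 + n = ((j + 1 + N : ℕ) : ℤ) := by omega
      rw [e2, e1, PySem.List.slice_natCast]
      congr 1; omega
    rw [hleft, hright, checkLoopA_eq_all]
    rw [Bool.eq_iff_iff, List.all_eq_true, beq_iff_eq]
    constructor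
    · intro h
      apply (rev_take_drop_iff li j N hN1 hNL).mpr
      intro k hk
      have hkmem : ((k : ℤ)) ∈ PySem.List.pyRange 0 n 1 := by
        rw [PySem.List.mem_pyRange_one]; omega
      have := h _ hkmem
      have g1 : PySem.List.pyGet? li (idx - (k : ℤ)) = li[j - k]? := by
        have e : idx - (k : ℤ) = ((j - k : ℕ) : ℤ) := by omega
        rw [e, PySem.List.pyGet?_natCast]
      have g2 : PySem.List.pyGet? li (idx + 1 + (k : ℤ)) = li[j + 1 + k]? := by
        have e : idx + 1 + (k : ℤ) = ((j + 1 + k : ℕ) : ℤ) := by omega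
        rw [e, PySem.List.pyGet?_natCast]
      rw [g1, g2] at this
      rw [li.getElem?_eq_getElem (by omega), li.getElem?_eq_getElem (by omega)] at this ⊢
      simp only at this
      cases hx : li[j - k] == li[j + 1 + k]
      · rw [hx] at this; exact absurd this (by simp)
      · simpa using hx
    · intro h i hi
      rw [PySem.List.mem_pyRange_one] at hi
      have hpt := (rev_take_drop_iff li j N hN1 hNL).mp h
      obtain ⟨k, hki⟩ : ∃ k : ℕ, i = (k : ℤ) :=
        ⟨i.toNat, (Int.toNat_of_nonneg hi.1).symm⟩
      have hk : k < N := by omega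
      have := hpt k hk
      have g1 : PySem.List.pyGet? li (idx - i) = li[j - k]? := by
        have e : idx - i = ((j - k : ℕ) : ℤ) := by omega
        rw [e, PySem.List.pyGet?_natCast]
      have g2 : PySem.List.pyGet? li (idx + 1 + i) = li[j + 1 + k]? := by
        have e : idx + 1 + i = ((j + 1 + k : ℕ) : ℤ) := by omega
        rw [e, PySem.List.pyGet?_natCast]
      rw [li.getElem?_eq_getElem (by omega), li.getElem?_eq_getElem (by omega)] at this
      simp only [Option.some_inj] at this
      rw [g1, g2, li.getElem?_eq_getElem (by omega), li.getElem?_eq_getElem (by omega)]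
      simp [this]
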